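-- pv_equiv track=rewrite | github.com/jitinkrishnan/NASA-SE | seva_preprocess.py | get_abbr_parts
-- ===== SOURCE A (Python) =====
-- def get_abbr_parts(abbr):
--     chars = []
--     start = 0
--     for index in range(1,len(abbr)):
--         if abbr[index].isupper():
--             chars.append(abbr[start:index])
--             start = index
--     chars.append(abbr[start:])
--     return chars
-- ===== SOURCE B (Python) =====
-- def get_abbr_parts(abbr):
--     if not abbr:
--         return ['']
--     parts = []
--     cur = [abbr[0]]
--     for ch in abbr[1:]:
--         if ch.isupper():
--             parts.append(''.join(cur))
--             cur = [ch]
--         else: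
--             cur.append(ch)
--     parts.append(''.join(cur))
--     return parts
-- ===== Notes on version B (the rewrite author's own statement) =====
-- stated objective: alternative
-- what changed: A scans index positions and carves the answer out of the string with slices at a running start index; B never computes an index or a slice: it folds over the characters themselves, accumulating the current part as a char list (flushed with ''.join on each uppercase character) and seeding it with the first character.
import Mathlib
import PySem

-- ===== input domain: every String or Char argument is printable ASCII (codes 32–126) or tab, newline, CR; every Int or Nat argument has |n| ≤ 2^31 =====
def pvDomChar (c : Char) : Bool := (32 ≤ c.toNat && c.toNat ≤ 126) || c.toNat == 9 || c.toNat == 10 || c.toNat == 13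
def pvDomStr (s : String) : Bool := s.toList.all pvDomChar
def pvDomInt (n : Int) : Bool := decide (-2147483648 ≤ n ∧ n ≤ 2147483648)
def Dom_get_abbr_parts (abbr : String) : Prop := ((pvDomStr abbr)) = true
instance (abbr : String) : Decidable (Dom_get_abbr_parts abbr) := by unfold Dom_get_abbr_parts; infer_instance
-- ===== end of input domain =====

-- B drops A's index/slice bookkeeping: it folds over the characters themselves,
-- accumulating the current part as a char list and joining it on each uppercase
-- character (same cost, different algorithmic decomposition).

-- helper for A: the Python expression abbr[index].isupper()
def pvIsUpAt (abbr : String) (i : Int) : Bool :=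
  match PySem.Str.pyGet? abbr i with
  | some c => PySem.Chars.isupper c
  | none => false

-- ===== PORT A =====
def get_abbr_parts (abbr : String) : List String :=
  let r := (PySem.List.pyRange 1 (PySem.Str.len abbr) 1).foldl
    (fun (st : List String × Int) index =>
      if pvIsUpAt abbr index then
        (st.1 ++ [PySem.Str.slice abbr (some st.2) (some index)], index)
      else st)
    ([], 0)
  r.1 ++ [PySem.Str.slice abbr (some r.2) none]

-- ===== PORT B =====
-- ''.join(cur) is ported as String.ofList (exact: cur is the list of the chunk's chars)
def get_abbr_parts_alt (abbr : String) : List String :=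
  match abbr.toList with
  | [] => [""]
  | c :: rest =>
    let r := rest.foldl
      (fun (st : List String × List Char) ch =>
        if PySem.Chars.isupper ch then (st.1 ++ [String.ofList st.2], [ch])
        else (st.1, st.2 ++ [ch]))
      ([], [c])
    r.1 ++ [String.ofList r.2]

-- ===== PRECONDITION & SPEC =====
def Spec_get_abbr_parts (abbr : String) (out : List String) : Prop := out = get_abbr_parts_alt abbr
instance (abbr : String) (out : List String) : Decidable (Spec_get_abbr_parts abbr out) := by unfold Spec_get_abbr_parts; infer_instance

-- ===== CLAIM =====
def Claim_equal_get_abbr_parts : Prop := ∀ (abbr : String), Dom_get_abbr_parts abbr → Spec_get_abbr_parts abbr (get_abbr_parts abbr)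

-- ===== LEMMAS AND PROOFS =====

-- functional form of B's fold: split a char list into parts, cur = part under construction
def pvSplit : List Char → List Char → List (List Char)
  | cur, [] => [cur]
  | cur, c :: l =>
    if PySem.Chars.isupper c then cur :: pvSplit [c] l else pvSplit (cur ++ [c]) l

theorem pvFoldB (l : List Char) : ∀ (ps : List String) (cur : List Char),
    (l.foldl
        (fun (st : List String × List Char) ch =>
          if PySem.Chars.isupper ch then (st.1 ++ [String.ofList st.2], [ch])
          else (st.1, st.2 ++ [ch]))
        (ps, cur)).1
      ++ [String.ofList (l.foldl
        (fun (st : List String × List Char) ch =>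
          if PySem.Chars.isupper ch then (st.1 ++ [String.ofList st.2], [ch])
          else (st.1, st.2 ++ [ch]))
        (ps, cur)).2]
    = ps ++ (pvSplit cur l).map String.ofList := by
  induction l with
  | nil => intro ps cur; simp [pvSplit]
  | cons c l ih =>
    intro ps cur
    cases h : PySem.Chars.isupper c with
    | true =>
      simp only [List.foldl_cons, h, if_true, pvSplit, List.map]
      rw [ih (ps ++ [String.ofList cur]) [c], List.append_assoc]
      rfl
    | false =>
      simp only [List.foldl_cons, h, Bool.false_eq_true, if_false, pvSplit]
      rw [ih ps (cur ++ [c])]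

-- functional form of A's result: slices between consecutive split indices, then the tail slice
def pvChainF (abbr : String) : Int → List Int → List String
  | s, [] => [PySem.Str.slice abbr (some s) none]
  | s, i :: is => PySem.Str.slice abbr (some s) (some i) :: pvChainF abbr i is

-- the chain of slices between consecutive boundaries (A's accumulator contents)
def pvChain (abbr : String) : Int → List Int → List String
  | _, [] => []
  | s, i :: is => PySem.Str.slice abbr (some s) (some i) :: pvChain abbr i is

theorem pvFoldA (abbr : String) (l : List Int) : ∀ (acc : List String) (s : Int),
    l.foldl (fun (st : List String × Int) index =>
        if pvIsUpAt abbr index then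
          (st.1 ++ [PySem.Str.slice abbr (some st.2) (some index)], index)
        else st)
      (acc, s)
    = (acc ++ pvChain abbr s (l.filter (fun i => pvIsUpAt abbr i)),
       (l.filter (fun i => pvIsUpAt abbr i)).getLastD s) := by
  induction l with
  | nil => intro acc s; simp [pvChain]
  | cons i is ih =>
    intro acc s
    cases h : pvIsUpAt abbr i with
    | true =>
      simp only [List.foldl_cons, h, if_true]
      rw [ih, List.filter_cons_of_pos h, List.getLastD_cons]
      simp [pvChain, List.append_assoc]
    | false =>
      simp only [List.foldl_cons, h, Bool.false_eq_true, if_false]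
      rw [ih, List.filter_cons_of_neg (by simp [h])]

theorem pvChainF_eq (abbr : String) (S : List Int) : ∀ (s : Int),
    pvChain abbr s S ++ [PySem.Str.slice abbr (some (S.getLastD s)) none]
      = pvChainF abbr s S := by
  induction S with
  | nil => intro s; rfl
  | cons i is ih =>
    intro s
    rw [List.getLastD_cons]
    show (PySem.Str.slice abbr (some s) (some i) :: pvChain abbr i is) ++ _ = _
    rw [List.cons_append, ih i]
    rfl

-- the key bridge: A's slice chain over the uppercase positions ≥ i equals B's
-- character-level split of the suffix, provided cur is exactly the slice [s:i).
theorem pvMain (abbr : String) (l : List Char) : ∀ (i s : Int), 0 ≤ s → s ≤ i →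
    abbr.toList.drop i.toNat = l →
    pvChainF abbr s
        ((PySem.List.pyRange i (PySem.Str.len abbr) 1).filter (fun j => pvIsUpAt abbr j))
      = (pvSplit ((abbr.toList.drop s.toNat).take (i - s).toNat) l).map String.ofList := by
  induction l with
  | nil =>
    intro i s hs hsi hdrop
    have hi : 0 ≤ i := le_trans hs hsi
    have hn : abbr.toList.length ≤ i.toNat := List.drop_eq_nil_iff.mp hdrop
    have hlenS : PySem.Str.len abbr = (abbr.toList.length : Int) := by simp [pysem]
    rw [PySem.List.pyRange_one_eq_nil (show PySem.Str.len abbr ≤ i by rw [hlenS]; omega)]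
    simp only [List.filter_nil, pvChainF, pvSplit, List.map]
    have hsl : PySem.Str.slice abbr (some s) none
        = String.ofList ((abbr.toList.drop s.toNat).take (i - s).toNat) := by
      apply String.toList_inj.mp
      rw [PySem.Str.toList_slice, PySem.Chars.slice_eq_listSlice, PySem.List.slice_from _ hs,
          String.toList_ofList, List.take_of_length_le (by rw [List.length_drop]; omega)]
    rw [hsl]
  | cons c l ihl =>
    intro i s hs hsi hdrop
    have hi : 0 ≤ i := le_trans hs hsi
    have hlen : i.toNat < abbr.toList.length := by
      by_contra h
      rw [List.drop_eq_nil_of_le (by omega)] at hdrop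
      exact List.cons_ne_nil _ _ hdrop.symm
    have hget : abbr.toList[i.toNat]? = some c := by
      have h0 : (abbr.toList.drop i.toNat)[0]? = some c := by rw [hdrop]; rfl
      simpa [List.getElem?_drop] using h0
    have hup : pvIsUpAt abbr i = PySem.Chars.isupper c := by
      simp [pvIsUpAt, PySem.Str.pyGet?, PySem.List.pyGet?_of_nonneg _ hi, hget]
    have hdrop' : abbr.toList.drop (i + 1).toNat = l := by
      have h1 : (i + 1).toNat = i.toNat + 1 := by omega
      rw [h1, ← List.drop_drop, hdrop, List.drop_one, List.tail_cons]
    have hlenS : PySem.Str.len abbr = (abbr.toList.length : Int) := by simp [pysem]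
    rw [PySem.List.pyRange_one_cons (show i < PySem.Str.len abbr by rw [hlenS]; omega)]
    cases hc : PySem.Chars.isupper c with
    | true =>
      rw [List.filter_cons_of_pos (by rw [hup]; exact hc)]
      simp only [pvChainF, pvSplit, hc, if_true, List.map]
      have hhead : PySem.Str.slice abbr (some s) (some i)
          = String.ofList ((abbr.toList.drop s.toNat).take (i - s).toNat) := by
        apply String.toList_inj.mp
        rw [PySem.Str.toList_slice, PySem.Chars.slice_eq_listSlice,
            PySem.List.slice_toNat _ hs hi, String.toList_ofList]
        congr 1
        omega
      have htail := ihl (i + 1) i hi (by omega) hdrop'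
      have hcur1 : (abbr.toList.drop i.toNat).take (i + 1 - i).toNat = [c] := by
        rw [hdrop, show ((i : Int) + 1 - i).toNat = 1 by omega]
        rfl
      rw [hcur1] at htail
      rw [hhead, htail]
    | false =>
      rw [List.filter_cons_of_neg (by rw [hup]; simp [hc])]
      simp only [pvSplit, hc, Bool.false_eq_true, if_false]
      have := ihl (i + 1) s hs (by omega) hdrop'
      have hcur : (abbr.toList.drop s.toNat).take ((i + 1 - s)).toNat
          = (abbr.toList.drop s.toNat).take (i - s).toNat ++ [c] := by
        have h1 : (i + 1 - s).toNat = (i - s).toNat + 1 := by omega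
        rw [h1, List.take_add_one]
        congr 1
        rw [List.getElem?_drop]
        have h2 : s.toNat + (i - s).toNat = i.toNat := by omega
        rw [h2, hget]
        rfl
      rw [hcur] at this
      exact this

-- ===== VERDICT =====
theorem get_abbr_parts_spec : Claim_equal_get_abbr_parts := by
  intro abbr _
  show get_abbr_parts abbr = get_abbr_parts_alt abbr
  simp only [get_abbr_parts]
  rw [pvFoldA]
  simp only [List.nil_append]
  rw [pvChainF_eq]
  cases h : abbr.toList with
  | nil =>
    have hr : PySem.List.pyRange 1 (PySem.Str.len abbr) 1 = [] :=
      PySem.List.pyRange_one_eq_nil (by simp [pysem, h])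
    rw [hr]
    simp only [List.filter_nil, pvChainF, get_abbr_parts_alt, h]
    have hsl : PySem.Str.slice abbr (some 0) none = "" := by
      apply String.toList_inj.mp
      rw [PySem.Str.toList_slice, PySem.Chars.slice_eq_listSlice,
          PySem.List.slice_from _ (by norm_num), h]
      rfl
    rw [hsl]
  | cons c rest =>
    have hcur : (abbr.toList.drop (0 : Int).toNat).take ((1 : Int) - 0).toNat = [c] := by
      rw [h]; rfl
    rw [pvMain abbr rest 1 0 (by norm_num) (by norm_num) (by simp [h]), hcur]
    simp only [get_abbr_parts_alt, h]
    have hfold := pvFoldB rest [] [c]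
    simp only [List.nil_append] at hfold
    rw [hfold]
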